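-- pv_equiv track=rewrite | github.com/switchchat/desktop | app/frontend/src/main.py | _extract_proper_nouns
-- ===== SOURCE A (Python) =====
-- def _words_similar(a, b):
--     """Prefix-based similarity: 'remind' matches 'reminder', etc."""
--     if a == b:
--         return True
--     if len(a) >= 3 and len(b) >= 3:
--         shorter, longer = (a, b) if len(a) <= len(b) else (b, a)
--         if longer.startswith(shorter):
--             return True
--     return False
--
-- def _extract_proper_nouns(text, strip_set=None, schema_words=None):
--     """Extract capitalized words (proper nouns) from text, skipping index 0."""
--     nouns = []
--     words = text.split()
--     for i, w in enumerate(words):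
--         cleaned = w.strip('.,!?;:\'"()[]{}')
--         if not cleaned or i == 0 or not cleaned[0].isupper():
--             continue
--         if cleaned.isdigit() or cleaned.upper() in ("AM", "PM"):
--             continue
--         if strip_set and schema_words and _should_strip(cleaned.lower(), strip_set, schema_words):
--             continue
--         nouns.append(cleaned)
--     return nouns
--
-- def _should_strip(word_lower, strip_set, schema_words):
--     """Check if a word should be stripped — exact match OR prefix of a schema word."""
--     if word_lower in strip_set:
--         return True
--     if len(word_lower) >= 3:
--         for sw in schema_words:
--             if _words_similar(word_lower, sw):
--                 return True
--     return False
-- ===== SOURCE B (Python) =====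
-- def _strip_fast(lw, strip, schema, prefixes):
--     """Set-lookup strip test: exact member, a prefix of a schema word, or extends one."""
--     if lw in strip:
--         return True
--     if len(lw) < 3:
--         return False
--     if lw in prefixes:
--         return True
--     return any(lw[:k] in schema for k in range(3, len(lw) + 1))
--
-- def _extract_proper_nouns(text, strip_set=None, schema_words=None):
--     filtering = bool(strip_set) and bool(schema_words)
--     if filtering:
--         strip = set(strip_set)
--         schema = set(schema_words)
--         prefixes = set()
--         for sw in schema_words:
--             for k in range(3, len(sw) + 1):
--                 prefixes.add(sw[:k])
--     else:
--         strip = schema = prefixes = set()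
--     cleaned = [w.strip('.,!?;:\'"()[]{}') for w in text.split()[1:]]
--     return [c for c in cleaned
--             if c and c[0].isupper() and not c.isdigit()
--             and c.upper() not in ("AM", "PM")
--             and not (filtering and _strip_fast(c.lower(), strip, schema, prefixes))]
-- ===== Notes on version B (the rewrite author's own statement) =====
-- stated objective: alternative
-- what changed: Replaces the per-word linear scan of schema_words with set lookups: a precomputed set of all length>=3 prefixes of schema words decides whether the word extends into a schema word, and membership tests of the word's own prefixes in a schema set decide whether a schema word starts the word; the outer pass becomes a comprehension over the cleaned tail words.
import Mathlib
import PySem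

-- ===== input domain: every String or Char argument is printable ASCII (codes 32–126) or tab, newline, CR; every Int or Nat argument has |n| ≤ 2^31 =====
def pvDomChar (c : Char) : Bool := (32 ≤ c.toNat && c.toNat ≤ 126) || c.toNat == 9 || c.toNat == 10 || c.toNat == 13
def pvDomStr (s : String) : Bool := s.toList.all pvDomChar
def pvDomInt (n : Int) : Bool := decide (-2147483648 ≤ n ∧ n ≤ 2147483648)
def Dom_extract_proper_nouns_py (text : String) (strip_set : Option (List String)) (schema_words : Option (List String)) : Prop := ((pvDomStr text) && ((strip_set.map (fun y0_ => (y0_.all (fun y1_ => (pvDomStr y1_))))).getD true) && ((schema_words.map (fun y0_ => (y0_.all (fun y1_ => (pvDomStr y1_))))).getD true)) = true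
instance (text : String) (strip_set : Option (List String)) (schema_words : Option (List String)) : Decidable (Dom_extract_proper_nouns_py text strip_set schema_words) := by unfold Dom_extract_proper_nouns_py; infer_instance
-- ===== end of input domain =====

-- B replaces A's per-word linear scan of schema_words by set lookups: a precomputed
-- set of the length-≥3 prefixes of the schema words, plus membership tests of the word's own prefixes.

-- truthiness of an optional list argument ('if strip_set and schema_words')
def pvTruthy (o : Option (List String)) : Bool :=
  match o with
  | none => false
  | some l => !l.isEmpty

-- ===== PORT A =====
def pvWordsSimilar (a b : String) : Bool :=
  if a == b then true
  else if 3 ≤ PySem.Str.len a && 3 ≤ PySem.Str.len b then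
    let p := if PySem.Str.len a ≤ PySem.Str.len b then (a, b) else (b, a)
    if PySem.Str.startswith p.2 p.1 then true else false
  else false

def pvShouldStrip (w : String) (strip_set schema_words : List String) : Bool :=
  if strip_set.contains w then true
  else if 3 ≤ PySem.Str.len w then schema_words.any (fun sw => pvWordsSimilar w sw)
  else false

def extract_proper_nouns_py (text : String) (strip_set : Option (List String)) (schema_words : Option (List String)) : List String :=
  let words := PySem.Str.split₀ text
  (PySem.List.enumerate words).foldl (fun nouns iw =>
    let cleaned := PySem.Str.stripChars iw.2 ".,!?;:'\"()[]{}"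
    if cleaned == "" || iw.1 == 0 || !(((PySem.Str.pyGet? cleaned 0).map PySem.Chars.isupper).getD false) then nouns
    else if PySem.Str.strIsdigit cleaned || (PySem.Str.upper cleaned == "AM" || PySem.Str.upper cleaned == "PM") then nouns
    else if (pvTruthy strip_set && pvTruthy schema_words) &&
            pvShouldStrip (PySem.Str.lower cleaned) (strip_set.getD []) (schema_words.getD []) then nouns
    else nouns ++ [cleaned]) []

-- ===== PORT B =====
def pvStripFast (lw : String) (strip schema prefixes : PySem.Set String) : Bool :=
  if PySem.Set.contains strip lw then true
  else if PySem.Str.len lw < 3 then false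
  else if PySem.Set.contains prefixes lw then true
  else (PySem.List.pyRange 3 (PySem.Str.len lw + 1)).any
         (fun k => PySem.Set.contains schema (PySem.Str.slice lw none (some k)))

def pvBuildPrefixes (schema_words : List String) : PySem.Set String :=
  schema_words.foldl (fun acc sw =>
    (PySem.List.pyRange 3 (PySem.Str.len sw + 1)).foldl
      (fun acc2 k => PySem.Set.add acc2 (PySem.Str.slice sw none (some k))) acc) []

-- the comprehension's condition
def pvKeep (filtering : Bool) (strip schema prefixes : PySem.Set String) (c : String) : Bool :=
  c != "" &&
  ((PySem.Str.pyGet? c 0).map PySem.Chars.isupper).getD false &&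
  !PySem.Str.strIsdigit c &&
  !(PySem.Str.upper c == "AM" || PySem.Str.upper c == "PM") &&
  !(filtering && pvStripFast (PySem.Str.lower c) strip schema prefixes)

def extract_proper_nouns_py_alt (text : String) (strip_set : Option (List String)) (schema_words : Option (List String)) : List String :=
  let filtering := pvTruthy strip_set && pvTruthy schema_words
  let strip : PySem.Set String := if filtering then PySem.Set.ofList (strip_set.getD []) else []
  let schema : PySem.Set String := if filtering then PySem.Set.ofList (schema_words.getD []) else []
  let prefixes : PySem.Set String := if filtering then pvBuildPrefixes (schema_words.getD []) else []
  let cleaned := (PySem.List.slice (PySem.Str.split₀ text) (some 1) none).map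
      (fun w => PySem.Str.stripChars w ".,!?;:'\"()[]{}")
  cleaned.filter (pvKeep filtering strip schema prefixes)

-- ===== PRECONDITION & SPEC =====
def Spec_extract_proper_nouns_py (text : String) (strip_set : Option (List String)) (schema_words : Option (List String)) (out : List String) : Prop := out = extract_proper_nouns_py_alt text strip_set schema_words
instance (text : String) (strip_set : Option (List String)) (schema_words : Option (List String)) (out : List String) : Decidable (Spec_extract_proper_nouns_py text strip_set schema_words out) := by unfold Spec_extract_proper_nouns_py; infer_instance

-- ===== CLAIM (what is proved, stated in full; the proofs are below) =====
def Claim_equal_extract_proper_nouns_py : Prop := ∀ (text : String) (strip_set : Option (List String)) (schema_words : Option (List String)), Dom_extract_proper_nouns_py text strip_set schema_words → Spec_extract_proper_nouns_py text strip_set schema_words (extract_proper_nouns_py text strip_set schema_words)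

-- ===== LEMMAS AND PROOFS =====

-- characterisation of _words_similar for a word of length ≥ 3
theorem pvWordsSimilar_char (w s : String) (hw : 3 ≤ w.toList.length) :
    pvWordsSimilar w s =
      (PySem.Str.startswith s w || (PySem.Str.startswith w s && decide (3 ≤ s.toList.length))) := by
  have hw' : 3 ≤ w.length := by simpa using hw
  simp only [pvWordsSimilar, PySem.Str.len_eq, PySem.Str.startswith_eq, String.length_toList]
  by_cases hsw : w = s
  · subst hsw
    simp [PySem.Chars.startswith_iff]
  · have hne : (w == s) = false := by simp [hsw]
    rw [hne]
    simp only [Bool.false_eq_true, if_false]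
    by_cases hs3 : 3 ≤ s.length
    · by_cases hle : w.length ≤ s.length
      · have hle' : w.toList.length ≤ s.toList.length := by simpa using hle
        have hws : PySem.Chars.startswith w.toList s.toList = false := by
          rw [Bool.eq_false_iff]
          intro h
          exact hsw (String.toList_inj.mp
            (((PySem.Chars.startswith_iff w.toList s.toList).mp h).eq_of_length_le hle')).symm
        simp [hw', hs3, hle, hws]
      · have hsws : PySem.Chars.startswith s.toList w.toList = false := by
          rw [Bool.eq_false_iff]
          intro h
          have := ((PySem.Chars.startswith_iff s.toList w.toList).mp h).length_le
          simp at this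
          omega
        simp [hw', hs3, hle, hsws]
    · have h1 : PySem.Chars.startswith s.toList w.toList = false := by
        rw [Bool.eq_false_iff]
        intro h
        have := ((PySem.Chars.startswith_iff s.toList w.toList).mp h).length_le
        simp at this
        omega
      simp [hs3, h1]

-- membership after repeatedly adding mapped elements to a set
theorem pv_mem_foldl_add {α β : Type} [BEq α] [LawfulBEq α] (l : List β) (f : β → α)
    (acc : PySem.Set α) (x : α) :
    x ∈ l.foldl (fun a y => PySem.Set.add a (f y)) acc ↔ x ∈ acc ∨ ∃ y ∈ l, x = f y := by
  induction l generalizing acc with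
  | nil => simp
  | cons h t ih =>
    simp [List.foldl_cons, ih, PySem.Set.mem_add]
    tauto

-- the length-≥3 prefixes of s are exactly its slices s[:k], 3 ≤ k ≤ len(s)
theorem pv_slice_char (s x : String) :
    (∃ k : Int, (3 ≤ k ∧ k < PySem.Str.len s + 1) ∧ x = PySem.Str.slice s none (some k)) ↔
      (x.toList <+: s.toList ∧ 3 ≤ x.toList.length) := by
  rw [PySem.Str.len_eq]
  constructor
  · rintro ⟨k, ⟨hk3, hklt⟩, rfl⟩
    have hk0 : 0 ≤ k := by omega
    have htl : (PySem.Str.slice s none (some k)).toList = s.toList.take k.toNat := by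
      rw [PySem.Str.toList_slice, PySem.Chars.slice_eq_listSlice, PySem.List.slice_to _ hk0]
    rw [htl]
    refine ⟨List.take_prefix _ _, ?_⟩
    rw [List.length_take]
    omega
  · rintro ⟨hpre, hlen⟩
    refine ⟨(x.toList.length : Int), ⟨by exact_mod_cast hlen, ?_⟩, ?_⟩
    · have := hpre.length_le
      omega
    · apply String.toList_inj.mp
      rw [PySem.Str.toList_slice, PySem.Chars.slice_eq_listSlice,
        PySem.List.slice_to _ (by positivity), Int.toNat_natCast]
      exact List.prefix_iff_eq_take.mp hpre

-- membership in the prefix set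
theorem pv_mem_buildPrefixes (sw : List String) (x : String) :
    x ∈ pvBuildPrefixes sw ↔ ∃ s ∈ sw, x.toList <+: s.toList ∧ 3 ≤ x.toList.length := by
  unfold pvBuildPrefixes
  have : ∀ (acc : PySem.Set String), x ∈ sw.foldl (fun acc sw =>
      (PySem.List.pyRange 3 (PySem.Str.len sw + 1)).foldl
        (fun acc2 k => PySem.Set.add acc2 (PySem.Str.slice sw none (some k))) acc) acc ↔
      x ∈ acc ∨ ∃ s ∈ sw, ∃ k ∈ PySem.List.pyRange 3 (PySem.Str.len s + 1), x = PySem.Str.slice s none (some k) := by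
    induction sw with
    | nil => simp
    | cons h t ih =>
      intro acc
      simp only [List.foldl_cons, ih, pv_mem_foldl_add, List.mem_cons]
      constructor
      · rintro (⟨hx | ⟨k, hk, rfl⟩⟩ | ⟨s, hs, hk⟩)
        · exact Or.inl hx
        · exact Or.inr ⟨h, Or.inl rfl, k, hk, rfl⟩
        · exact Or.inr ⟨s, Or.inr hs, hk⟩
      · rintro (hx | ⟨s, (rfl | hs), k, hk, rfl⟩)
        · exact Or.inl (Or.inl hx)
        · exact Or.inl (Or.inr ⟨k, hk, rfl⟩)
        · exact Or.inr ⟨s, hs, k, hk, rfl⟩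
  rw [this]
  simp only [List.not_mem_nil, false_or]
  constructor
  · rintro ⟨s, hs, k, hk, rfl⟩
    rw [PySem.List.mem_pyRange_one] at hk
    exact ⟨s, hs, (pv_slice_char s _).mp ⟨k, hk, rfl⟩⟩
  · rintro ⟨s, hs, hx⟩
    obtain ⟨k, hk, rfl⟩ := (pv_slice_char s x).mpr hx
    exact ⟨s, hs, k, PySem.List.mem_pyRange_one.mpr hk, rfl⟩

-- the inner any over the word's own prefixes
theorem pv_any_prefix (w : String) (schema : List String) :
    ((PySem.List.pyRange 3 (PySem.Str.len w + 1)).any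
        (fun k => PySem.Set.contains (PySem.Set.ofList schema) (PySem.Str.slice w none (some k))) = true)
      ↔ ∃ s ∈ schema, s.toList <+: w.toList ∧ 3 ≤ s.toList.length := by
  simp only [List.any_eq_true, PySem.Set.contains, List.contains_iff_mem, PySem.Set.mem_ofList]
  constructor
  · rintro ⟨k, hk, hmem⟩
    rw [PySem.List.mem_pyRange_one] at hk
    exact ⟨_, hmem, (pv_slice_char w _).mp ⟨k, hk, rfl⟩⟩
  · rintro ⟨s, hs, hx⟩
    obtain ⟨k, hk, rfl⟩ := (pv_slice_char w s).mpr hx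
    exact ⟨k, PySem.List.mem_pyRange_one.mpr hk, hs⟩

-- CORE: the two strip tests agree
theorem pvStrip_eq (w : String) (ss sw : List String) :
    pvShouldStrip w ss sw =
      pvStripFast w (PySem.Set.ofList ss) (PySem.Set.ofList sw) (pvBuildPrefixes sw) := by
  rw [Bool.eq_iff_iff]
  unfold pvShouldStrip pvStripFast
  by_cases hc : w ∈ ss
  · simp [hc, PySem.Set.contains, PySem.Set.mem_ofList]
  · have hc1 : ss.contains w = false := by simpa using hc
    have hc2 : PySem.Set.contains (PySem.Set.ofList ss) w = false := by
      simp [PySem.Set.contains, PySem.Set.mem_ofList, hc]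
    rw [hc1, hc2]
    simp only [Bool.false_eq_true, if_false]
    by_cases h3 : 3 ≤ w.toList.length
    · have h3' : (3:Int) ≤ PySem.Str.len w := by rw [PySem.Str.len_eq]; exact_mod_cast h3
      have h3f : ¬ (PySem.Str.len w < 3) := by omega
      rw [if_pos h3', if_neg h3f]
      have hany : (sw.any fun s => pvWordsSimilar w s) =
          (sw.any fun s => (PySem.Str.startswith s w || (PySem.Str.startswith w s && decide (3 ≤ s.toList.length)))) :=
        PySem.List.any_congr_mem (fun s _ => pvWordsSimilar_char w s h3)
      rw [hany]
      simp only [List.any_eq_true, Bool.or_eq_true, Bool.and_eq_true, decide_eq_true_eq,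
        PySem.Str.startswith_eq, PySem.Chars.startswith_iff]
      by_cases hp : w ∈ pvBuildPrefixes sw
      · rw [pv_mem_buildPrefixes] at hp
        obtain ⟨s, hs, hpre, _⟩ := hp
        have : w ∈ pvBuildPrefixes sw := (pv_mem_buildPrefixes sw w).mpr ⟨s, hs, hpre, h3⟩
        simp only [PySem.Set.contains, List.contains_iff_mem, this, if_true, iff_true]
        exact ⟨s, hs, Or.inl hpre⟩
      · have hpf : PySem.Set.contains (pvBuildPrefixes sw) w = false := by
          simp [PySem.Set.contains, hp]
        rw [hpf]
        simp only [Bool.false_eq_true, if_false]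
        rw [pv_any_prefix]
        rw [pv_mem_buildPrefixes] at hp
        constructor
        · rintro ⟨s, hs, hpre | ⟨hpre, hlen⟩⟩
          · exact absurd ⟨s, hs, hpre, h3⟩ hp
          · exact ⟨s, hs, hpre, hlen⟩
        · rintro ⟨s, hs, hpre, hlen⟩
          exact ⟨s, hs, Or.inr ⟨hpre, hlen⟩⟩
    · have h3' : ¬ ((3:Int) ≤ PySem.Str.len w) := by rw [PySem.Str.len_eq]; exact_mod_cast h3
      have h3f : PySem.Str.len w < 3 := by omega
      rw [if_neg h3', if_pos h3f]

-- A's loop body equals the comprehension step, for a nonzero index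
set_option maxHeartbeats 1000000 in
theorem pv_body_eq (strip_set schema_words : Option (List String)) (i : Int) (hi : i ≠ 0)
    (w : String) (acc : List String) :
    (if PySem.Str.stripChars w ".,!?;:'\"()[]{}" == "" || i == 0 ||
        !(((PySem.Str.pyGet? (PySem.Str.stripChars w ".,!?;:'\"()[]{}") 0).map PySem.Chars.isupper).getD false) then acc
     else if PySem.Str.strIsdigit (PySem.Str.stripChars w ".,!?;:'\"()[]{}") ||
        (PySem.Str.upper (PySem.Str.stripChars w ".,!?;:'\"()[]{}") == "AM" ||
         PySem.Str.upper (PySem.Str.stripChars w ".,!?;:'\"()[]{}") == "PM") then acc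
     else if (pvTruthy strip_set && pvTruthy schema_words) &&
             pvShouldStrip (PySem.Str.lower (PySem.Str.stripChars w ".,!?;:'\"()[]{}"))
               (strip_set.getD []) (schema_words.getD []) then acc
     else acc ++ [PySem.Str.stripChars w ".,!?;:'\"()[]{}"]) =
    (if pvKeep (pvTruthy strip_set && pvTruthy schema_words)
        (if pvTruthy strip_set && pvTruthy schema_words then PySem.Set.ofList (strip_set.getD []) else [])
        (if pvTruthy strip_set && pvTruthy schema_words then PySem.Set.ofList (schema_words.getD []) else [])
        (if pvTruthy strip_set && pvTruthy schema_words then pvBuildPrefixes (schema_words.getD []) else [])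
        (PySem.Str.stripChars w ".,!?;:'\"()[]{}")
     then acc ++ [PySem.Str.stripChars w ".,!?;:'\"()[]{}"] else acc) := by
  have hieq : (i == 0) = false := by simpa using hi
  simp only [hieq, Bool.or_false, pvKeep]
  generalize PySem.Str.stripChars w ".,!?;:'\"()[]{}" = c
  have hstrip : ((pvTruthy strip_set && pvTruthy schema_words) &&
      pvShouldStrip (PySem.Str.lower c) (strip_set.getD []) (schema_words.getD [])) =
      ((pvTruthy strip_set && pvTruthy schema_words) &&
        pvStripFast (PySem.Str.lower c)
          (if pvTruthy strip_set && pvTruthy schema_words then PySem.Set.ofList (strip_set.getD []) else [])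
          (if pvTruthy strip_set && pvTruthy schema_words then PySem.Set.ofList (schema_words.getD []) else [])
          (if pvTruthy strip_set && pvTruthy schema_words then pvBuildPrefixes (schema_words.getD []) else [])) := by
    by_cases hf : (pvTruthy strip_set && pvTruthy schema_words) = true
    · rw [hf]
      simp only [Bool.true_and]
      exact pvStrip_eq _ _ _
    · rw [Bool.eq_false_iff.mpr hf]
      simp
  rw [hstrip]
  clear hstrip
  simp only [bne]
  rcases Bool.eq_false_or_eq_true (c == "") with h1|h1 <;>
    rcases Bool.eq_false_or_eq_true (((PySem.Str.pyGet? c 0).map PySem.Chars.isupper).getD false) with h2|h2 <;>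
      rcases Bool.eq_false_or_eq_true (PySem.Str.strIsdigit c ||
        (PySem.Str.upper c == "AM" || PySem.Str.upper c == "PM")) with h3|h3 <;>
        rcases Bool.eq_false_or_eq_true ((pvTruthy strip_set && pvTruthy schema_words) &&
            pvStripFast (PySem.Str.lower c)
              (if pvTruthy strip_set && pvTruthy schema_words then PySem.Set.ofList (strip_set.getD []) else [])
              (if pvTruthy strip_set && pvTruthy schema_words then PySem.Set.ofList (schema_words.getD []) else [])
              (if pvTruthy strip_set && pvTruthy schema_words then pvBuildPrefixes (schema_words.getD []) else [])) with h4|h4 <;>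
          simp_all <;> (try (obtain ⟨⟨ha, hb⟩, hc⟩ := h4; simp_all)) <;>
            (try (rintro hd hA hB; rcases h3 with h3|h3|h3 <;> simp_all)) <;>
            (try (by_cases hA : pvTruthy strip_set = true <;> by_cases hB : pvTruthy schema_words = true <;> simp_all))

-- A's fold over the enumerated tail, rewritten as filter+map
theorem pv_fold_eq (strip_set schema_words : Option (List String)) (xs : List String)
    (s : Int) (hs : 1 ≤ s) (acc : List String) :
    (PySem.List.enumerate xs s).foldl (fun nouns iw =>
      if PySem.Str.stripChars iw.2 ".,!?;:'\"()[]{}" == "" || iw.1 == 0 ||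
          !(((PySem.Str.pyGet? (PySem.Str.stripChars iw.2 ".,!?;:'\"()[]{}") 0).map PySem.Chars.isupper).getD false) then nouns
      else if PySem.Str.strIsdigit (PySem.Str.stripChars iw.2 ".,!?;:'\"()[]{}") ||
          (PySem.Str.upper (PySem.Str.stripChars iw.2 ".,!?;:'\"()[]{}") == "AM" ||
           PySem.Str.upper (PySem.Str.stripChars iw.2 ".,!?;:'\"()[]{}") == "PM") then nouns
      else if (pvTruthy strip_set && pvTruthy schema_words) &&
              pvShouldStrip (PySem.Str.lower (PySem.Str.stripChars iw.2 ".,!?;:'\"()[]{}"))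
                (strip_set.getD []) (schema_words.getD []) then nouns
      else nouns ++ [PySem.Str.stripChars iw.2 ".,!?;:'\"()[]{}"]) acc =
    acc ++ (xs.map (fun w => PySem.Str.stripChars w ".,!?;:'\"()[]{}")).filter
      (pvKeep (pvTruthy strip_set && pvTruthy schema_words)
        (if pvTruthy strip_set && pvTruthy schema_words then PySem.Set.ofList (strip_set.getD []) else [])
        (if pvTruthy strip_set && pvTruthy schema_words then PySem.Set.ofList (schema_words.getD []) else [])
        (if pvTruthy strip_set && pvTruthy schema_words then pvBuildPrefixes (schema_words.getD []) else [])) := by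
  induction xs generalizing s acc with
  | nil => simp [PySem.List.enumerate]
  | cons x xs ih =>
    rw [PySem.List.enumerate_cons, List.foldl_cons]
    rw [pv_body_eq strip_set schema_words s (by omega) x acc]
    rw [ih (s + 1) (by omega)]
    simp only [List.map_cons, List.filter_cons]
    split <;> split <;> simp

-- ===== VERDICT (by name: the statement is the Claim_ definition above) =====
theorem extract_proper_nouns_py_spec : Claim_equal_extract_proper_nouns_py := by
  intro text strip_set schema_words _
  unfold Spec_extract_proper_nouns_py extract_proper_nouns_py extract_proper_nouns_py_alt
  simp only
  rw [PySem.List.slice_from _ (by norm_num)]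
  cases hw : PySem.Str.split₀ text with
  | nil => simp [PySem.List.enumerate]
  | cons w0 rest =>
    rw [PySem.List.enumerate_cons, List.foldl_cons]
    have h0 : ((0:Int) == 0) = true := by decide
    simp only [h0, Bool.or_true, Bool.true_or, if_pos]
    have h01 : (0:Int) + 1 = 1 := by norm_num
    rw [h01, pv_fold_eq strip_set schema_words rest 1 (by omega) []]
    simp [List.filter_map, Function.comp_def]
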